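-- pv_equiv track=rewrite | github.com/Andreal2000/advent-of-code | 2015/03/perfectly_spherical_houses_in_a_vacuum.py | part_two
-- ===== SOURCE A (Python) =====
-- directions = {"^": (0, 1), "v": (0, -1), ">": (1, 0), "<": (-1, 0)}
--
-- def add(a, b): return tuple(map(sum, zip(a, b)))
--
-- def part_two(input):
--     santa = (0, 0)
--     robo = (0, 0)
--     houses = [(0, 0)]
--
--     for i in range(len(input)):
--         if i % 2 == 0:
--             santa = add(santa, directions[input[i]])
--             houses.append(santa)
--         else:
--             robo = add(robo, directions[input[i]])
--             houses.append(robo)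
--
--     return len(set(houses))
-- ===== SOURCE B (Python) =====
-- def part_two(input):
--     directions = {"^": (0, 1), "v": (0, -1), ">": (1, 0), "<": (-1, 0)}
--     houses = {(0, 0)}
--     for moves in (input[0::2], input[1::2]):
--         x, y = 0, 0
--         for c in moves:
--             dx, dy = directions[c]
--             x, y = x + dx, y + dy
--             houses.add((x, y))
--     return len(houses)
-- ===== Notes on version B (the rewrite author's own statement) =====
-- stated objective: alternative
-- what changed: B replaces A's single interleaved index loop with an i%2 branch by two independent passes: it slices the input into the Santa stream input[0::2] and the Robo stream input[1::2], accumulates each stream's running positions from (0,0), and returns the size of the union set (origin included once).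
import Mathlib
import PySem

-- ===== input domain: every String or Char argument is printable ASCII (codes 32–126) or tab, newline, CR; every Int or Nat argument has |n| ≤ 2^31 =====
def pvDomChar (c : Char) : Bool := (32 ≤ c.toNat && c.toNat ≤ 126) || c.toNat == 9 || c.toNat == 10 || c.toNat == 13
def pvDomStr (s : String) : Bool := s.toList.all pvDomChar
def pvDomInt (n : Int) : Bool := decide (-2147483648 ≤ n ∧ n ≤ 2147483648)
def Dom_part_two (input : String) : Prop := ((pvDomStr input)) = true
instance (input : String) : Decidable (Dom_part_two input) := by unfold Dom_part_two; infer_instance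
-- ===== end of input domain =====

-- B replaces A's interleaved index loop (i%2 branch) by two independent strided-slice passes
-- accumulated into a set; alternative decomposition, same asymptotic cost; return values proved equal on Pre_.


-- ===== PORT A =====
-- module constant: directions = {"^": (0, 1), "v": (0, -1), ">": (1, 0), "<": (-1, 0)}
def pvDirections : PySem.Dict Char (Int × Int) :=
  PySem.Dict.mk [('^', (0, 1)), ('v', (0, -1)), ('>', (1, 0)), ('<', (-1, 0))]

-- def add(a, b): return tuple(map(sum, zip(a, b)))  (on the 2-tuples used here: componentwise addition)
def pvAdd (a b : Int × Int) : Int × Int := (a.1 + b.1, a.2 + b.2)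

-- directions[input[i]] raises KeyError on a char that is not a key; those inputs are excluded by
-- Pre_part_two, so the (0, 0) default of getD is never consulted on admitted inputs.
def part_two (input : String) : Int :=
  let cs := input.toList
  let st :=
    (PySem.List.pyRange 0 cs.length 1).foldl
      (fun (st : (Int × Int) × (Int × Int) × List (Int × Int)) i =>
        if PySem.Int.mod i 2 == 0 then
          let santa := pvAdd st.1 (PySem.Dict.getD pvDirections (PySem.List.pyGetD cs i ' ') (0, 0))
          (santa, st.2.1, st.2.2 ++ [santa])
        else
          let robo := pvAdd st.2.1 (PySem.Dict.getD pvDirections (PySem.List.pyGetD cs i ' ') (0, 0))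
          (st.1, robo, st.2.2 ++ [robo])) ((0, 0), (0, 0), [(0, 0)])
  ((PySem.Set.ofList st.2.2).length : Int)

-- ===== PORT B =====
-- directions[c] raises KeyError on a char that is not a key; excluded by Pre_part_two ((0,0) default unused there)
def part_two_alt (input : String) : Int :=
  let directions : PySem.Dict Char (Int × Int) :=
    PySem.Dict.mk [('^', (0, 1)), ('v', (0, -1)), ('>', (1, 0)), ('<', (-1, 0))]
  let cs := input.toList
  let santaMoves := (PySem.List.slice? cs (some 0) none 2).getD []   -- input[0::2]
  let roboMoves  := (PySem.List.slice? cs (some 1) none 2).getD []   -- input[1::2]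
  let step := fun (st : PySem.Set (Int × Int) × (Int × Int)) (c : Char) =>
    let d := PySem.Dict.getD directions c (0, 0)
    let q := (st.2.1 + d.1, st.2.2 + d.2)
    (st.1.add q, q)
  let houses0 : PySem.Set (Int × Int) := PySem.Set.ofList [(0, 0)]   -- {(0, 0)}
  let houses1 := (santaMoves.foldl step (houses0, ((0 : Int), (0 : Int)))).1
  let houses2 := (roboMoves.foldl step (houses1, ((0 : Int), (0 : Int)))).1
  (houses2.length : Int)

-- ===== PRECONDITION & SPEC =====
-- Pre_ excludes exactly the inputs containing a character that is not one of the four direction keys, on which A raises KeyError.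
def Pre_part_two (input : String) : Prop :=
  (input.toList.all (fun c => c == '^' || c == 'v' || c == '>' || c == '<')) = true
instance (input : String) : Decidable (Pre_part_two input) := by unfold Pre_part_two; infer_instance

def pvWitness_part_two : String := "^v<>"

def Spec_part_two (input : String) (out : Int) : Prop := out = part_two_alt input
instance (input : String) (out : Int) : Decidable (Spec_part_two input out) := by unfold Spec_part_two; infer_instance

-- ===== CLAIM (what is proved, stated in full; the proofs are below) =====
def Claim_equal_part_two : Prop := ∀ (input : String), Dom_part_two input → Pre_part_two input → Spec_part_two input (part_two input)

-- ===== LEMMAS AND PROOFS =====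

-- one step of either walker
def pvMove (p : Int × Int) (c : Char) : Int × Int :=
  let d := PySem.Dict.getD pvDirections c (0, 0)
  (p.1 + d.1, p.2 + d.2)

-- the list of positions visited by one walker starting at p (origin excluded)
def pvWalk (p : Int × Int) : List Char → List (Int × Int)
  | [] => []
  | c :: cs => pvMove p c :: pvWalk (pvMove p c) cs

-- the interleaved list of positions A appends: s moves first, then the roles swap
def pvInter (s r : Int × Int) : List Char → List (Int × Int)
  | [] => []
  | c :: cs => pvMove s c :: pvInter r (pvMove s c) cs

-- even- and odd-indexed sublists
mutual
def pvEvens {α : Type} : List α → List α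
  | [] => []
  | a :: l => a :: pvOdds l
def pvOdds {α : Type} : List α → List α
  | [] => []
  | _ :: l => pvEvens l
end

-- A's loop appends exactly the interleaved trail (k = absolute index, parity decides whose turn it is)
theorem pvA_loop (xs : List Char) : ∀ (n k : Nat) (s r : Int × Int) (hs : List (Int × Int)),
    xs.length - k = n →
    ∃ s' r', (PySem.List.pyRange (k : Int) (xs.length : Int) 1).foldl
      (fun (st : (Int × Int) × (Int × Int) × List (Int × Int)) i =>
        if PySem.Int.mod i 2 == 0 then
          let santa := pvAdd st.1 (PySem.Dict.getD pvDirections (PySem.List.pyGetD xs i ' ') (0, 0))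
          (santa, st.2.1, st.2.2 ++ [santa])
        else
          let robo := pvAdd st.2.1 (PySem.Dict.getD pvDirections (PySem.List.pyGetD xs i ' ') (0, 0))
          (st.1, robo, st.2.2 ++ [robo])) (s, r, hs)
      = (s', r', hs ++ (if k % 2 = 0 then pvInter s r (xs.drop k) else pvInter r s (xs.drop k))) := by
  intro n
  induction n with
  | zero =>
    intro k s r hs hn
    refine ⟨s, r, ?_⟩
    rw [PySem.List.pyRange_one_eq_nil (by exact_mod_cast Nat.le_of_sub_eq_zero hn)]
    rw [List.drop_eq_nil_of_le (by omega)]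
    simp [pvInter]
  | succ n ih =>
    intro k s r hs hn
    have hk : k < xs.length := by omega
    rw [PySem.List.pyRange_one_cons (by exact_mod_cast hk)]
    rw [List.foldl_cons]
    have hget : PySem.List.pyGetD xs (k : Int) ' ' = xs[k] := by
      rw [PySem.List.pyGetD_natCast, List.getD_eq_getElem _ _ hk]
    have hmod : PySem.Int.mod (k : Int) 2 = ((k % 2 : Nat) : Int) := by
      exact_mod_cast PySem.Int.mod_natCast k 2
    have hdrop : xs.drop k = xs[k] :: xs.drop (k + 1) := List.drop_eq_getElem_cons hk
    have hcast : ((k : Int) + 1) = ((k + 1 : Nat) : Int) := by push_cast; ring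
    by_cases hk2 : k % 2 = 0
    · have hcond : (PySem.Int.mod (k : Int) 2 == 0) = true := by
        rw [hmod, hk2]; rfl
      simp only [hcond, if_true, hget]
      obtain ⟨s', r', heq⟩ := ih (k + 1) (pvAdd s (PySem.Dict.getD pvDirections xs[k] (0, 0))) r
        (hs ++ [pvAdd s (PySem.Dict.getD pvDirections xs[k] (0, 0))]) (by omega)
      rw [hcast, heq]
      refine ⟨s', r', ?_⟩
      have hpar : ¬ ((k + 1) % 2 = 0) := by omega
      rw [if_neg hpar, if_pos hk2, hdrop]
      simp only [pvInter, pvMove, pvAdd, List.append_assoc, List.cons_append, List.nil_append]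
    · have hcond : (PySem.Int.mod (k : Int) 2 == 0) = false := by
        have : k % 2 = 1 := by omega
        rw [hmod, this]; rfl
      simp only [hcond, if_false, Bool.false_eq_true, hget]
      obtain ⟨s', r', heq⟩ := ih (k + 1) s (pvAdd r (PySem.Dict.getD pvDirections xs[k] (0, 0)))
        (hs ++ [pvAdd r (PySem.Dict.getD pvDirections xs[k] (0, 0))]) (by omega)
      rw [hcast, heq]
      refine ⟨s', r', ?_⟩
      have hpar : (k + 1) % 2 = 0 := by omega
      rw [if_pos hpar, if_neg hk2, hdrop]
      simp only [pvInter, pvMove, pvAdd, List.append_assoc, List.cons_append, List.nil_append]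

-- the interleaved trail is a permutation of the two per-walker trails
theorem pvInter_perm (l : List Char) : ∀ s r : Int × Int,
    (pvInter s r l).Perm (pvWalk s (pvEvens l) ++ pvWalk r (pvOdds l)) := by
  induction l with
  | nil => intro s r; simp [pvInter, pvEvens, pvOdds, pvWalk]
  | cons c cs ih =>
    intro s r
    simp only [pvInter, pvEvens, pvOdds, pvWalk, List.cons_append]
    exact ((ih r (pvMove s c)).trans List.perm_append_comm).cons _

-- a stride-2 filterMap over index ranges picks out exactly the even-/odd-indexed sublists
theorem pvFilterMap_stride {α : Type} : ∀ xs : List α,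
    (List.filterMap (fun k => xs[2*k]?) (List.range ((xs.length+1)/2)) = pvEvens xs) ∧
    (List.filterMap (fun k => xs[2*k+1]?) (List.range (xs.length/2)) = pvOdds xs) := by
  intro xs
  induction xs with
  | nil => simp [pvEvens, pvOdds]
  | cons a l ih =>
    constructor
    · have hc : (l.length + 1 + 1) / 2 = l.length / 2 + 1 := by omega
      simp only [List.length_cons, hc, List.range_succ_eq_map, List.filterMap_cons,
        List.filterMap_map]
      simp only [Nat.mul_zero, List.getElem?_cons_zero, Function.comp_def, Nat.mul_succ,
        Nat.succ_eq_add_one]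
      have : ∀ k : Nat, (a :: l)[2*k+2]? = l[2*k+1]? := by
        intro k
        have : 2*k+2 = (2*k+1)+1 := by omega
        rw [this, List.getElem?_cons_succ]
      simp only [this, ih.2]
      rfl
    · simp only [List.length_cons]
      have : ∀ k : Nat, (a :: l)[2*k+1]? = l[2*k]? := by
        intro k; rw [List.getElem?_cons_succ]
      simp only [this, ih.1]
      rfl

-- the strided slices input[0::2] / input[1::2] are the even-/odd-indexed sublists
theorem pvSlice_evens {α : Type} (xs : List α) :
    PySem.List.slice? xs (some 0) none 2 = some (pvEvens xs) := by
  rw [PySem.List.slice?, PySem.List.sliceIndices]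
  norm_num
  have hcnt : (if 0 < xs.length then (((xs.length:Int) + 2 - 1)/2).toNat else 0)
      = (xs.length + 1)/2 := by
    split <;> omega
  rw [hcnt]
  have hidx : (fun x : Nat => xs[(2 * (x:Int)).toNat]?) = (fun x : Nat => xs[2*x]?) := by
    funext x
    have h2 : (2 * (x:Int)).toNat = 2*x := by omega
    rw [h2]
  rw [hidx, (pvFilterMap_stride xs).1]

theorem pvSlice_odds {α : Type} (xs : List α) :
    PySem.List.slice? xs (some 1) none 2 = some (pvOdds xs) := by
  rw [PySem.List.slice?, PySem.List.sliceIndices]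
  norm_num
  cases xs with
  | nil => simp [pvOdds]
  | cons a l =>
    have hmin : min 1 ((a :: l).length : Int) = 1 := by simp
    rw [hmin]
    have hcnt : (if 1 < (a :: l).length then ((((a :: l).length : Int) - 1 + 2 - 1)/2).toNat else 0)
        = (a :: l).length / 2 := by
      split <;> omega
    rw [hcnt]
    have hidx : (fun x : Nat => (a :: l)[(1 + 2 * (x:Int)).toNat]?) = (fun x : Nat => (a :: l)[2*x+1]?) := by
      funext x
      have h2 : (1 + 2 * (x:Int)).toNat = 2*x+1 := by omega
      rw [h2]
    rw [hidx, (pvFilterMap_stride (a :: l)).2]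

-- B's per-stream fold adds exactly the walk positions to the set
theorem pvB_fold (l : List Char) : ∀ (S : PySem.Set (Int × Int)) (p : Int × Int),
    (l.foldl (fun (st : PySem.Set (Int × Int) × (Int × Int)) (c : Char) =>
        let d := PySem.Dict.getD pvDirections c (0, 0)
        let q := (st.2.1 + d.1, st.2.2 + d.2)
        (st.1.add q, q)) (S, p)).1
      = List.foldl PySem.Set.add S (pvWalk p l) := by
  induction l with
  | nil => intro S p; simp [pvWalk]
  | cons c cs ih => intro S p; simp only [List.foldl_cons, pvWalk]; exact ih _ _

-- folding add over an appended list continues the set built from the first part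
theorem pvOfList_append (l₁ l₂ : List (Int × Int)) :
    PySem.Set.ofList (l₁ ++ l₂) = List.foldl PySem.Set.add (PySem.Set.ofList l₁) l₂ := by
  simp [PySem.Set.ofList, List.foldl_append]

-- distinct-count is invariant under permutation
theorem pvOfList_length_perm (l₁ l₂ : List (Int × Int)) (h : l₁.Perm l₂) :
    (PySem.Set.ofList l₁).length = (PySem.Set.ofList l₂).length := by
  rw [← List.toFinset_card_of_nodup (PySem.Set.nodup_ofList l₁),
      ← List.toFinset_card_of_nodup (PySem.Set.nodup_ofList l₂)]
  congr 1
  ext x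
  simp [PySem.Set.mem_ofList, h.mem_iff]

-- ===== VERDICT (by name: the statement is the Claim_ definition above) =====
theorem part_two_spec : Claim_equal_part_two := by
  intro input _ _
  show part_two input = part_two_alt input
  simp only [part_two, part_two_alt]
  rw [show (PySem.Dict.mk [('^', ((0:Int), (1:Int))), ('v', (0, -1)), ('>', (1, 0)), ('<', (-1, 0))]) = pvDirections from rfl]
  rw [pvSlice_evens, pvSlice_odds, Option.getD_some, Option.getD_some]
  obtain ⟨s', r', hA⟩ := pvA_loop input.toList input.toList.length 0 (0, 0) (0, 0) [(0, 0)] (by omega)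
  rw [show ((0 : Nat) : Int) = 0 from rfl] at hA
  rw [if_pos (show (0 : Nat) % 2 = 0 from rfl), List.drop_zero] at hA
  rw [hA, pvB_fold, pvB_fold, ← pvOfList_append, ← pvOfList_append]
  have hperm : (((0, 0) : Int × Int) :: pvInter (0, 0) (0, 0) input.toList).Perm
      ([((0, 0) : Int × Int)] ++ pvWalk (0, 0) (pvEvens input.toList) ++ pvWalk (0, 0) (pvOdds input.toList)) :=
    ((pvInter_perm input.toList (0, 0) (0, 0)).cons ((0, 0) : Int × Int)).trans
      (List.Perm.of_eq (by simp))
  exact congrArg (Nat.cast : Nat → Int) (pvOfList_length_perm _ _ hperm)
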